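-- pv_equiv track=rewrite | github.com/appinha/adventofcode_2020 | day_17/main.py | get_ina_adj
-- ===== SOURCE A (Python) =====
-- import itertools as it
--
-- def get_ina_adj(exts):
-- 	''' Get list of new layer of inactive neighbors. '''
-- 	ls_diff = [-1, +1]
-- 	lim = [n + ls_diff[i % 2] for i, n in enumerate(exts)]
-- 	ls_ranges_out = [range(lim[i], lim[i + 1]) for i in range(0, len(lim), 2)]
-- 	ls_ranges_in = [range(exts[i], exts[i + 1]) for i in range(0, len(exts), 2)]
-- 	outer = list(it.product(*ls_ranges_out))
-- 	inner = list(it.product(*ls_ranges_in))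
-- 	return [pos for pos in outer if pos not in inner]
-- ===== SOURCE B (Python) =====
-- import itertools as it
--
-- def get_ina_adj(exts):
-- 	''' Get list of new layer of inactive neighbors. '''
-- 	pairs = [(exts[i], exts[i + 1]) for i in range(0, len(exts), 2)]
-- 	outer = it.product(*[range(lo - 1, hi + 1) for lo, hi in pairs])
-- 	return [pos for pos in outer
-- 	        if any(c < lo or hi <= c for c, (lo, hi) in zip(pos, pairs))]
-- ===== Notes on version B (the rewrite author's own statement) =====
-- stated objective: simpler
-- what changed: B drops A's materialised inner product and its list-membership scan per outer point, keeping an outer point iff some coordinate lies outside its dimension's inner half-open interval (a direct per-axis boundary test in one pass over the outer product, same order).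
import Mathlib
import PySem

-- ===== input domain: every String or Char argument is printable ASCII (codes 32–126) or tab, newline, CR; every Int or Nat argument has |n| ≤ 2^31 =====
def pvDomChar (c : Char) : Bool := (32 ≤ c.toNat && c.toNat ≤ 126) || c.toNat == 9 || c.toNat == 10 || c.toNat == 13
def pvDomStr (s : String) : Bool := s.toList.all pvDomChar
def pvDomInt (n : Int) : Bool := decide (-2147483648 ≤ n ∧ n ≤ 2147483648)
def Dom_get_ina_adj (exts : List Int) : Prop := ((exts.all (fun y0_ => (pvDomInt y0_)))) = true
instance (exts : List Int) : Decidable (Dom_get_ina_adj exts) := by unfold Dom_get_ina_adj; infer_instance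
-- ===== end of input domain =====

-- B drops A's materialised inner product entirely and keeps an outer point iff some
-- coordinate lies outside its inner half-open interval (objective: simpler).

-- itertools.product over a list of integer lists, in itertools order (first factor slowest)
def pyProd : List (List Int) → List (List Int)
  | [] => [[]]
  | r :: rs => r.flatMap (fun x => (pyProd rs).map (fun t => x :: t))

-- ===== PORT A =====
-- lim[i+1] is in range for every index A reads when exts has even length (Pre_);
-- on odd length Python raises IndexError, excluded by Pre_, so pyGetD's default is never used there.
def get_ina_adj (exts : List Int) : List (List Int) :=
  let ls_diff : List Int := [-1, 1]
  let lim : List Int := (PySem.List.enumerate exts 0).map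
    (fun p => p.2 + PySem.List.pyGetD ls_diff (PySem.Int.mod p.1 2) 0)
  let ls_ranges_out := (PySem.List.pyRange 0 (lim.length : Int) 2).map
    (fun i => PySem.List.pyRange (PySem.List.pyGetD lim i 0) (PySem.List.pyGetD lim (i + 1) 0) 1)
  let ls_ranges_in := (PySem.List.pyRange 0 (exts.length : Int) 2).map
    (fun i => PySem.List.pyRange (PySem.List.pyGetD exts i 0) (PySem.List.pyGetD exts (i + 1) 0) 1)
  let outer := pyProd ls_ranges_out
  let inner := pyProd ls_ranges_in
  outer.filter (fun pos => !(inner.contains pos))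

-- ===== PORT B =====
def get_ina_adj_alt (exts : List Int) : List (List Int) :=
  let pairs := (PySem.List.pyRange 0 (exts.length : Int) 2).map
    (fun i => (PySem.List.pyGetD exts i 0, PySem.List.pyGetD exts (i + 1) 0))
  let outer := pyProd (pairs.map (fun p => PySem.List.pyRange (p.1 - 1) (p.2 + 1) 1))
  outer.filter (fun pos =>
    (pos.zip pairs).any (fun q => decide (q.1 < q.2.1) || decide (q.2.2 ≤ q.1)))

-- ===== PRECONDITION & SPEC =====
-- Pre_ excludes odd-length exts, on which both Pythons raise IndexError (exts[i+1] past the end).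
def Pre_get_ina_adj (exts : List Int) : Prop := exts.length % 2 = 0
instance (exts : List Int) : Decidable (Pre_get_ina_adj exts) := by unfold Pre_get_ina_adj; infer_instance
def pvWitness_get_ina_adj : List Int := [0, 2]
def Spec_get_ina_adj (exts : List Int) (out : List (List Int)) : Prop := out = get_ina_adj_alt exts
instance (exts : List Int) (out : List (List Int)) : Decidable (Spec_get_ina_adj exts out) := by unfold Spec_get_ina_adj; infer_instance

-- ===== CLAIM (what is proved, stated in full; the proofs are below) =====
def Claim_equal_get_ina_adj : Prop := ∀ (exts : List Int), Dom_get_ina_adj exts → Pre_get_ina_adj exts → Spec_get_ina_adj exts (get_ina_adj exts)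

-- ===== LEMMAS AND PROOFS =====

theorem pyProd_length_of_mem : ∀ (rs : List (List Int)) (pos : List Int),
    pos ∈ pyProd rs → pos.length = rs.length := by
  intro rs
  induction rs with
  | nil => intro pos h; simp [pyProd] at h; simp [h]
  | cons r rs ih =>
      intro pos h
      simp [pyProd, List.mem_flatMap, List.mem_map] at h
      obtain ⟨x, hx, t, ht, rfl⟩ := h
      simp [ih t ht]

-- a point of known arity lies in the inner product iff no coordinate is outside its interval
theorem mem_pyProd_ranges : ∀ (ps : List (Int × Int)) (pos : List Int), pos.length = ps.length →
    (pos ∈ pyProd (ps.map (fun p => PySem.List.pyRange p.1 p.2 1)) ↔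
      ¬ ((pos.zip ps).any (fun q => decide (q.1 < q.2.1) || decide (q.2.2 ≤ q.1)) = true)) := by
  intro ps
  induction ps with
  | nil =>
      intro pos h
      simp only [List.length_nil] at h
      rw [List.length_eq_zero_iff] at h
      subst h
      simp [pyProd]
  | cons p ps ih =>
      intro pos h
      cases pos with
      | nil => simp at h
      | cons c t =>
          have hlen : t.length = ps.length := by simpa using h
          simp only [List.map_cons, pyProd, List.mem_flatMap, List.mem_map,
            PySem.List.mem_pyRange_one, List.zip_cons_cons, List.any_cons]
          rw [show (∃ x, (p.1 ≤ x ∧ x < p.2) ∧ ∃ a ∈ pyProd (ps.map fun p => PySem.List.pyRange p.1 p.2 1), x :: a = c :: t) ↔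
              ((p.1 ≤ c ∧ c < p.2) ∧ t ∈ pyProd (ps.map fun p => PySem.List.pyRange p.1 p.2 1)) from by
            constructor
            · rintro ⟨x, hx, a, ha, heq⟩
              obtain ⟨rfl, rfl⟩ : x = c ∧ a = t := by simpa using heq
              exact ⟨hx, ha⟩
            · rintro ⟨hc, ht⟩; exact ⟨c, hc, t, ht, rfl⟩]
          rw [ih t hlen]
          simp only [Bool.or_eq_true, decide_eq_true_eq]
          constructor
          · rintro ⟨hc, ht⟩ hbad
            rcases hbad with h1 | h2
            · omega
            · exact ht h2
          · intro hgood
            push Not at hgood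
            exact ⟨by omega, hgood.2⟩

-- ===== VERDICT (by name: the statement is the Claim_ definition above) =====
theorem get_ina_adj_spec : Claim_equal_get_ina_adj := by
  intro exts _ hpre
  unfold Spec_get_ina_adj
  unfold Pre_get_ina_adj at hpre
  simp only [get_ina_adj, get_ina_adj_alt]
  rw [PySem.List.enumerate_eq_map_pyRange exts 0]
  simp only [List.map_map, List.length_map, PySem.List.length_pyRange_one, PySem.List.len,
    sub_zero, Int.toNat_natCast, Function.comp_def]
  have hranges :
      List.map
        (fun i =>
          PySem.List.pyRange
            (PySem.List.pyGetD
              (List.map (fun j => PySem.List.pyGetD exts j 0 + PySem.List.pyGetD [-1, 1] (PySem.Int.mod j 2) 0)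
                (PySem.List.pyRange 0 (↑exts.length)))
              i 0)
            (PySem.List.pyGetD
              (List.map (fun j => PySem.List.pyGetD exts j 0 + PySem.List.pyGetD [-1, 1] (PySem.Int.mod j 2) 0)
                (PySem.List.pyRange 0 (↑exts.length)))
              (i + 1) 0))
        (PySem.List.pyRange 0 (↑exts.length) 2) =
      List.map
        (fun i => PySem.List.pyRange (PySem.List.pyGetD exts i 0 - 1) (PySem.List.pyGetD exts (i + 1) 0 + 1))
        (PySem.List.pyRange 0 (↑exts.length) 2) := by
    apply List.map_congr_left
    intro i hi
    rw [PySem.List.mem_pyRange_iff_of_pos (by norm_num)] at hi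
    obtain ⟨h0, hn, hdvd⟩ := hi
    rw [sub_zero] at hdvd
    have hi1 : i + 1 < (exts.length : Int) := by omega
    rw [PySem.List.pyGetD_map_pyRange_of_nonneg _ _ i 0 h0 hn,
        PySem.List.pyGetD_map_pyRange_of_nonneg _ _ (i + 1) 0 (by omega) hi1]
    have m0 : PySem.Int.mod i 2 = 0 := (PySem.Int.mod_eq_zero_iff_dvd i 2).mpr hdvd
    have m1 : PySem.Int.mod (i + 1) 2 = 1 := by
      rcases PySem.Int.mod_two_eq (i + 1) with h | h
      · rw [PySem.Int.mod_eq_zero_iff_dvd] at h; omega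
      · exact h
    rw [m0, m1,
        show PySem.List.pyGetD ([-1, 1] : List Int) 0 0 = -1 from by decide,
        show PySem.List.pyGetD ([-1, 1] : List Int) 1 0 = 1 from by decide,
        show ∀ x : Int, x + -1 = x - 1 from fun x => by ring]
  rw [hranges]
  apply List.filter_congr
  intro pos hpos
  have hlen : pos.length =
      (List.map (fun i => (PySem.List.pyGetD exts i 0, PySem.List.pyGetD exts (i + 1) 0))
        (PySem.List.pyRange 0 (↑exts.length) 2)).length := by
    have := pyProd_length_of_mem _ pos hpos
    simpa using this
  have h := mem_pyProd_ranges
    (List.map (fun i => (PySem.List.pyGetD exts i 0, PySem.List.pyGetD exts (i + 1) 0))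
      (PySem.List.pyRange 0 (↑exts.length) 2)) pos hlen
  rw [List.map_map] at h
  simp only [Function.comp_def] at h
  cases hb : (pos.zip
      (List.map (fun i => (PySem.List.pyGetD exts i 0, PySem.List.pyGetD exts (i + 1) 0))
        (PySem.List.pyRange 0 (↑exts.length) 2))).any
      (fun q => decide (q.1 < q.2.1) || decide (q.2.2 ≤ q.1)) <;>
    simp_all
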